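-- pv_equiv track=rewrite | github.com/HoonDongKang/Algorithm | 백준/Silver/2164. 카드2/카드2.py | solve
-- ===== SOURCE A (Python) =====
-- from collections import deque
--
-- def solve(cards: int) -> int:
--     cards_queue = deque()
--     index = 0
--
--     for i in range(cards):
--         cards_queue.append(i+1)
--
--     while len(cards_queue) != 1:
--         if index % 2 == 0:
--             cards_queue.popleft()
--         else:
--             cards_queue.append(cards_queue.popleft())
--         index += 1
--
--     return cards_queue[0]
-- ===== SOURCE B (Python) =====
-- def solve(cards: int) -> int:
--     l = 1 << (cards.bit_length() - 1)
--     r = cards - l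
--     return 2 * r if r else cards
-- ===== Notes on version B (the rewrite author's own statement) =====
-- stated objective: faster
-- what changed: Replaced the O(n) deque simulation of the discard/move card game with the O(1) Josephus closed form 2*(n - 2^floor(log2 n)), returning n itself when n is a power of two.
import Mathlib
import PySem

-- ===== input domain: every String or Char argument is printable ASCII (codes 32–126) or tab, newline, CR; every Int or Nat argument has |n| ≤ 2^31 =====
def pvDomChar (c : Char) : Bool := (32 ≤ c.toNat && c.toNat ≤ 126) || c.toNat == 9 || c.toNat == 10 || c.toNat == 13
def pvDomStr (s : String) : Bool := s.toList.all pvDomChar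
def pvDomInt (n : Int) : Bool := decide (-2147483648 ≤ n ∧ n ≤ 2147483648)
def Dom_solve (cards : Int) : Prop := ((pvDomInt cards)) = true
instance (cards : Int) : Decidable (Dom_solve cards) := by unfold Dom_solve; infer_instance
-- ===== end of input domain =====

-- B replaces A's O(n) deque simulation of the discard/move game by the O(1)
-- Josephus closed form 2*(n - 2^floor(log2 n)) (n itself when n is a power of 2).

-- ===== PORT A =====
-- the while loop: drop the head on even index, rotate the head to the back on odd index;
-- '[]' cannot occur for cards ≥ 1 (Python raises IndexError there, excluded by Pre_).
def solveLoop (q : List Int) (index : Int) : Int :=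
  match q with
  | [] => 0
  | [x] => x
  | x :: y :: rest =>
    if index % 2 = 0 then solveLoop (y :: rest) (index + 1)
    else solveLoop ((y :: rest) ++ [x]) (index + 1)
termination_by 2 * q.length + (if index % 2 = 0 then 0 else 1)
decreasing_by
  all_goals
    simp only [List.length_cons, List.length_append, List.length_nil]
    split <;> omega

def solve (cards : Int) : Int :=
  -- for i in range(cards): cards_queue.append(i+1)
  let cards_queue := (PySem.List.pyRange 0 cards 1).map (fun i => i + 1)
  solveLoop cards_queue 0

-- ===== PORT B =====
-- l = 1 << (cards.bit_length() - 1): bit_length |c| = Nat.log2 |c| + 1 for c ≠ 0, so l = 2 ^ Nat.log2 |c|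
def solve_alt (cards : Int) : Int :=
  let l : Int := 2 ^ Nat.log2 cards.natAbs
  let r : Int := cards - l
  if r = 0 then cards else 2 * r

-- ===== PRECONDITION & SPEC =====
-- A raises IndexError (popleft from an empty deque) for cards ≤ 0.
def Pre_solve (cards : Int) : Prop := 1 ≤ cards
instance (cards : Int) : Decidable (Pre_solve cards) := by unfold Pre_solve; infer_instance

def pvWitness_solve : Int := (6)

def Spec_solve (cards : Int) (out : Int) : Prop := out = solve_alt cards
instance (cards : Int) (out : Int) : Decidable (Spec_solve cards out) := by unfold Spec_solve; infer_instance

-- ===== CLAIM (what is proved, stated in full; the proofs are below) =====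
def Claim_equal_solve : Prop := ∀ (cards : Int), Dom_solve cards → Pre_solve cards → Spec_solve cards (solve cards)

-- ===== LEMMAS AND PROOFS =====

-- 0-indexed position of the survivor in a queue of length n
def pIdx : Nat → Nat
  | 0 => 0
  | 1 => 0
  | (k+2) => if pIdx (k+1) < k then pIdx (k+1) + 2 else 1

theorem pIdx_succ_succ (k : Nat) : pIdx (k+2) = if pIdx (k+1) < k then pIdx (k+1) + 2 else 1 := rfl

theorem pIdx_le : ∀ k : Nat, pIdx (k + 1) ≤ k := by
  intro k
  induction k with
  | zero => simp [pIdx]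
  | succ m ih =>
    rw [pIdx_succ_succ]
    split <;> omega

-- two loop iterations starting at an even index: drop the head, rotate the next to the back
theorem solveLoop_pair (x y : Int) (r : List Int) (index : Int) (h : index % 2 = 0) :
    solveLoop (x :: y :: r) index = solveLoop (r ++ [y]) (index + 2) := by
  rw [solveLoop]
  simp only [h, if_pos]
  cases r with
  | nil => simp [solveLoop]
  | cons z r' =>
    rw [solveLoop]
    have h1 : (index + 1) % 2 ≠ 0 := by omega
    simp only [if_neg h1]
    have h2 : index + 1 + 1 = index + 2 := by ring
    simp [h2]

theorem solveLoop_eq_getD (n : Nat) : ∀ (q : List Int) (index : Int),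
    q.length = n + 1 → index % 2 = 0 → solveLoop q index = q.getD (pIdx q.length) 0 := by
  induction n using Nat.strong_induction_on with
  | _ n ih =>
    intro q index hlen hev
    match q with
    | [x] => simp [solveLoop, pIdx]
    | x :: y :: r =>
      have hrl : r.length + 2 = n + 1 := by simpa using hlen
      rw [solveLoop_pair x y r index hev]
      have hlen' : (r ++ [y]).length = r.length + 1 := by simp
      have hrec := ih r.length (by omega) (r ++ [y]) (index + 2) hlen' (by omega)
      rw [hrec, hlen']
      show (r ++ [y]).getD (pIdx (r.length + 1)) 0 = (x :: y :: r).getD (pIdx (r.length + 2)) 0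
      have hle : pIdx (r.length + 1) ≤ r.length := pIdx_le r.length
      rw [pIdx_succ_succ]
      by_cases hlt : pIdx (r.length + 1) < r.length
      · rw [if_pos hlt]
        rw [List.getD_eq_getElem?_getD, List.getD_eq_getElem?_getD]
        rw [List.getElem?_append_left (by simpa using hlt)]
        simp [hlt]
      · rw [if_neg hlt]
        have heq : pIdx (r.length + 1) = r.length := by omega
        rw [heq, List.getD_eq_getElem?_getD]
        rw [List.getElem?_append_right (by omega)]
        simp

-- closed form for the survivor position
theorem pIdx_closed : ∀ n : Nat, 1 ≤ n →
    pIdx n = if n = 2 ^ Nat.log2 n then n - 1 else 2 * (n - 2 ^ Nat.log2 n) - 1 := by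
  intro n hn
  induction n using Nat.strong_induction_on with
  | _ n ih =>
    match n, hn with
    | 1, _ => decide
    | (m+2), _ =>
      have ihm := ih (m + 1) (by omega) (by omega)
      set e := Nat.log2 (m + 1) with he
      have hEle : 2 ^ e ≤ m + 1 := Nat.log2_self_le (by omega)
      have hltE : m + 1 < 2 ^ (e + 1) := Nat.lt_log2_self
      have hE2 : 2 ^ (e + 1) = 2 * 2 ^ e := by ring
      by_cases hpow2 : m + 2 = 2 ^ (e + 1)
      · -- m+2 is a power of two
        have hlog2 : Nat.log2 (m + 2) = e + 1 := by rw [hpow2]; exact Nat.log2_two_pow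
        rw [pIdx_succ_succ, ihm, hlog2]
        by_cases hp : m + 1 = 2 ^ e
        · have hm0 : m = 0 := by omega
          rw [if_pos hp, if_neg (by omega : ¬ (m + 1 - 1 < m)), if_pos hpow2]
          omega
        · rw [if_neg hp, if_pos (by omega), if_pos hpow2]
          omega
      · -- m+2 is not a power of two: log2 (m+2) = e
        have hub : m + 2 < 2 ^ (e + 1) := by omega
        have hlog2 : Nat.log2 (m + 2) = e := by
          apply Nat.le_antisymm
          · have := (Nat.log2_lt (by omega : m + 2 ≠ 0)).mpr hub
            omega
          · exact (Nat.le_log2 (by omega)).mpr (by omega)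
        rw [pIdx_succ_succ, ihm, hlog2, if_neg (by omega : ¬ (m + 2 = 2 ^ e))]
        by_cases hp : m + 1 = 2 ^ e
        · rw [if_pos hp, if_neg (by omega : ¬ (m + 1 - 1 < m))]
          omega
        · rw [if_neg hp, if_pos (by omega)]
          omega

theorem getD_queue (n : Nat) (i : Nat) (hi : i < n) :
    (((PySem.List.pyRange 0 (n : Int) 1).map (fun i => i + 1)).getD i 0) = (i : Int) + 1 := by
  rw [PySem.List.pyRange_zero_nat]
  rw [List.getD_eq_getElem?_getD]
  simp [hi]

-- ===== VERDICT (by name: the statement is the Claim_ definition above) =====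
theorem solve_spec : Claim_equal_solve := by
  intro cards _ hpre
  unfold Spec_solve solve solve_alt
  have h1 : (1:Int) ≤ cards := hpre
  have habs : cards.natAbs = cards.toNat := by omega
  rw [habs]
  set n : Nat := cards.toNat with hn
  have hcast : (n : Int) = cards := Int.toNat_of_nonneg (by omega)
  have hn1 : 1 ≤ n := by omega
  have hlen : ((PySem.List.pyRange 0 cards 1).map (fun i => i + 1)).length = n := by
    rw [List.length_map, PySem.List.length_pyRange_one]
    omega
  obtain ⟨m, hm⟩ : ∃ m, n = m + 1 := ⟨n - 1, by omega⟩
  have hloop := solveLoop_eq_getD m ((PySem.List.pyRange 0 cards 1).map (fun i => i + 1)) 0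
    (by omega) (by decide)
  simp only [hloop, hlen]
  have hclosed := pIdx_closed n hn1
  have hEle : 2 ^ Nat.log2 n ≤ n := Nat.log2_self_le (by omega)
  by_cases hp : n = 2 ^ Nat.log2 n
  · rw [hclosed, if_pos hp]
    rw [← hcast, getD_queue n (n-1) (by omega)]
    have h0 : (n:Int) - (2:Int) ^ Nat.log2 n = 0 := by
      have : ((2 ^ Nat.log2 n : Nat) : Int) = (2:Int) ^ Nat.log2 n := by push_cast; ring
      omega
    rw [if_pos h0]
    omega
  · rw [hclosed, if_neg hp]
    have hidx : 2 * (n - 2 ^ Nat.log2 n) - 1 < n := by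
      have hlt : n < 2 ^ (Nat.log2 n + 1) := Nat.lt_log2_self
      have h2 : 2 ^ (Nat.log2 n + 1) = 2 * 2 ^ Nat.log2 n := by ring
      omega
    rw [← hcast, getD_queue n _ hidx]
    have hcast2 : ((2 ^ Nat.log2 n : Nat) : Int) = (2:Int) ^ Nat.log2 n := by push_cast; ring
    have hne : ¬ ((n:Int) - (2:Int) ^ Nat.log2 n = 0) := by
      intro h
      exact hp (by omega)
    rw [if_neg hne]
    omega
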